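-- pv_equiv track=rewrite | github.com/funchaal/LPR-AI | app/modules/PlateObject.py | definePossibleReadings
-- ===== SOURCE A (Python) =====
-- from collections import defaultdict
--
-- def definePossibleReadings(plates):
--     plate_pontuation = defaultdict(int)
--
--     for plate in plates.keys():
--         substrings = set(
--             plate[j:j + i]
--             for i in range(2, len(plate))
--             for j in range(len(plate) - i + 1)
--         )
--         for substring in substrings:
--             for reading, count in plates.items():
--                 if substring in reading:
--                     plate_pontuation[plate] += plates[plate]
--
--     top_plates = sorted(plate_pontuation, key=plate_pontuation.get, reverse=True)[:2]
--     return top_plates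
-- ===== SOURCE B (Python) =====
-- def definePossibleReadings(plates):
--     # Build once: for every distinct substring (length >= 2) of every reading,
--     # the number of readings that contain it.
--     contain = {}
--     for reading in plates:
--         n = len(reading)
--         seen = {reading[i:j] for i in range(n) for j in range(i + 2, n + 1)}
--         for s in seen:
--             contain[s] = contain.get(s, 0) + 1
--
--     def score(plate):
--         n = len(plate)
--         subs = {plate[j:j + i] for i in range(2, n) for j in range(n - i + 1)}
--         return plates[plate] * sum(contain.get(s, 0) for s in subs)
--
--     candidates = [p for p in plates if len(p) >= 3]
--     return sorted(candidates, key=score, reverse=True)[:2]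
-- ===== Notes on version B (the rewrite author's own statement) =====
-- stated objective: faster
-- what changed: Instead of testing every distinct substring of every plate against every reading (nested containment scans), B builds one dictionary mapping each distinct substring (length >= 2) of each reading to the number of readings containing it, then scores each plate by a single sum of lookups over its substring set.
import Mathlib
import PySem

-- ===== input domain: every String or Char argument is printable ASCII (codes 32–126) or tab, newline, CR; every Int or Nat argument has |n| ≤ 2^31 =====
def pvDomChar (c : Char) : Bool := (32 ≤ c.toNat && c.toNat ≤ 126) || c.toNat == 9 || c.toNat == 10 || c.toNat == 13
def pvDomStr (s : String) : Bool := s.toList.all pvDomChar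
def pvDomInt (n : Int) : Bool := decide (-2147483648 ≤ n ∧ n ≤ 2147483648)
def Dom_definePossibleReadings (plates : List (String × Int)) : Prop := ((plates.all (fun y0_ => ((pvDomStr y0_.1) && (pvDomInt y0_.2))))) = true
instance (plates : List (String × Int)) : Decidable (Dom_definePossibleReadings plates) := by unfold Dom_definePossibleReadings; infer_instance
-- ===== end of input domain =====

-- B replaces A's per-plate containment scans over all readings by one index counting,
-- for every distinct substring (length ≥ 2) of every reading, the readings containing it
-- (objective: faster, asymptotic — measured).

-- ===== PORT A =====
-- the set comprehension both Pythons contain literally: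
-- { plate[j:j+i] for i in range(2, len(plate)) for j in range(len(plate)-i+1) }
def pvSubs (p : String) : List String :=
  (PySem.List.pyRange 2 (PySem.Str.len p)).flatMap (fun i =>
    (PySem.List.pyRange 0 (PySem.Str.len p - i + 1)).map (fun j =>
      PySem.Str.slice p (some j) (some (j + i))))

-- plate_pontuation after A's triple loop (plate_pontuation[plate] += plates[plate])
def pvPont (d : PySem.Dict String Int) : PySem.Dict String Int :=
  d.keys.foldl (fun pont plate =>
      (PySem.Set.ofList (pvSubs plate)).foldl (fun pont substring =>
        d.items.foldl (fun pont rv =>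
          if PySem.Str.isIn substring rv.1 then
            pont.modify plate 0 (· + d.getD plate 0)
          else pont) pont) pont)
    PySem.Dict.empty

def definePossibleReadings (plates : List (String × Int)) : List String :=
  let d := PySem.Dict.ofList plates
  -- sorted(plate_pontuation, key=plate_pontuation.get, reverse=True)[:2]
  -- (.get is ported as getD _ 0: every key of plate_pontuation is present)
  PySem.List.slice
    (PySem.List.sorted (pvPont d).keys (fun p => (pvPont d).getD p 0) true)
    none (some 2)

-- ===== PORT B =====
-- { reading[i:j] for i in range(n) for j in range(i+2, n+1) }
def pvSeen (r : String) : List String :=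
  (PySem.List.pyRange 0 (PySem.Str.len r)).flatMap (fun i =>
    (PySem.List.pyRange (i + 2) (PySem.Str.len r + 1)).map (fun j =>
      PySem.Str.slice r (some i) (some j)))

-- contain[s] = number of readings having s (len ≥ 2) as a substring
def pvContain (d : PySem.Dict String Int) : PySem.Dict String Int :=
  d.keys.foldl (fun con reading =>
      (PySem.Set.ofList (pvSeen reading)).foldl (fun con s =>
        con.insert s (con.getD s 0 + 1)) con)
    PySem.Dict.empty

-- def score(plate): plates[plate] * sum(contain.get(s, 0) for s in subs)
-- (plates[plate] is ported as getD _ 0: score is only called on keys of plates)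
def pvScore (d : PySem.Dict String Int) (plate : String) : Int :=
  d.getD plate 0 *
    ((PySem.Set.ofList (pvSubs plate)).map (fun s => (pvContain d).getD s 0)).sum

def definePossibleReadings_alt (plates : List (String × Int)) : List String :=
  let d := PySem.Dict.ofList plates
  PySem.List.slice
    (PySem.List.sorted (d.keys.filter (fun p => 3 ≤ PySem.Str.len p)) (pvScore d) true)
    none (some 2)

-- ===== PRECONDITION & SPEC =====
def Spec_definePossibleReadings (plates : List (String × Int)) (out : List String) : Prop := out = definePossibleReadings_alt plates
instance (plates : List (String × Int)) (out : List String) : Decidable (Spec_definePossibleReadings plates out) := by unfold Spec_definePossibleReadings; infer_instance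

-- ===== CLAIM (what is proved, stated in full; the proofs are below) =====
def Claim_equal_definePossibleReadings : Prop := ∀ (plates : List (String × Int)), Dom_definePossibleReadings plates → Spec_definePossibleReadings plates (definePossibleReadings plates)

-- ===== LEMMAS AND PROOFS =====

-- number of readings (items of d) containing s
def pvCnt (I : List (String × Int)) (s : String) : Int :=
  (I.countP (fun rv => PySem.Str.isIn s rv.1) : Int)

-- A's final score of plate p
def pvSB (d : PySem.Dict String Int) (p : String) : Int :=
  ((PySem.Set.ofList (pvSubs p)).map (fun s => pvCnt d.items s)).sum * d.getD p 0

lemma keys_modify_add (po : PySem.Dict String Int) (k : String) (f : Int → Int) :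
    (po.modify k 0 f).keys = PySem.Set.add po.keys k := by
  rw [PySem.Dict.keys_modify]
  by_cases h : k ∈ po.keys
  · rw [PySem.Dict.keys_insert_of_contains _ _ ((PySem.Dict.contains_iff_mem_keys _ _).2 h)]
    unfold PySem.Set.add
    rw [if_pos ((PySem.Set.contains_iff _ _).2 h)]
  · have hc : po.contains k = false := by
      rcases Bool.eq_false_or_eq_true (po.contains k) with hc | hc
      · exact absurd ((PySem.Dict.contains_iff_mem_keys _ _).1 hc) h
      · exact hc
    rw [PySem.Dict.keys_insert_of_not_contains _ _ hc]
    unfold PySem.Set.add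
    rw [if_neg (by
      intro hc'
      exact h ((PySem.Set.contains_iff _ _).1 hc'))]

lemma set_add_idem (s : PySem.Set String) (x : String) :
    PySem.Set.add (PySem.Set.add s x) x = PySem.Set.add s x := by
  by_cases h : x ∈ s
  · unfold PySem.Set.add
    rw [if_pos ((PySem.Set.contains_iff _ _).2 h), if_pos ((PySem.Set.contains_iff _ _).2 h)]
  · unfold PySem.Set.add
    rw [if_neg (fun hc => h ((PySem.Set.contains_iff _ _).1 hc))]
    rw [if_pos ((PySem.Set.contains_iff _ _).2 (by simp))]

lemma inner_getD (I : List (String × Int)) (po : PySem.Dict String Int)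
    (k q s : String) (w : Int) :
    (I.foldl (fun po rv =>
        if PySem.Str.isIn s rv.1 then po.modify k 0 (· + w) else po) po).getD q 0
      = po.getD q 0 + (if q = k then pvCnt I s * w else 0) := by
  induction I generalizing po with
  | nil => simp [pvCnt]
  | cons rv t ih =>
    have hcnt : pvCnt (rv :: t) s
        = (if PySem.Str.isIn s rv.1 then 1 else 0) + pvCnt t s := by
      unfold pvCnt
      rw [List.countP_cons]
      by_cases h : PySem.Str.isIn s rv.1 = true
      · simp only [h]
        push_cast
        ring
      · simp only [h]
        push_cast
        ring
    simp only [List.foldl_cons]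
    by_cases h : PySem.Str.isIn s rv.1 = true
    · rw [if_pos h, ih, PySem.Dict.getD_modify, hcnt, if_pos h]
      by_cases hq : q = k
      · subst hq
        simp only [if_true]
        ring
      · simp [hq]
    · rw [if_neg h, ih, hcnt, if_neg h, zero_add]

lemma inner_keys (I : List (String × Int)) (po : PySem.Dict String Int)
    (k s : String) (w : Int) :
    (I.foldl (fun po rv =>
        if PySem.Str.isIn s rv.1 then po.modify k 0 (· + w) else po) po).keys
      = if I.any (fun rv => PySem.Str.isIn s rv.1) then PySem.Set.add po.keys k
        else po.keys := by
  induction I generalizing po with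
  | nil => simp
  | cons rv t ih =>
    simp only [List.foldl_cons, List.any_cons]
    by_cases h : PySem.Str.isIn s rv.1 = true
    · rw [if_pos h, ih, keys_modify_add]
      simp only [h, Bool.true_or, if_true]
      by_cases ht : t.any (fun rv => PySem.Str.isIn s rv.1) = true
      · rw [if_pos ht, set_add_idem]
      · rw [if_neg ht]
    · rw [if_neg h, ih]
      simp only [h, Bool.false_or]

lemma middle_getD (L : List String) (I : List (String × Int))
    (po : PySem.Dict String Int) (k q : String) (w : Int) :
    (L.foldl (fun po s => I.foldl (fun po rv =>
        if PySem.Str.isIn s rv.1 then po.modify k 0 (· + w) else po) po) po).getD q 0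
      = po.getD q 0 + (if q = k then (L.map (fun s => pvCnt I s)).sum * w else 0) := by
  induction L generalizing po with
  | nil => simp
  | cons s t ih =>
    simp only [List.foldl_cons, List.map_cons, List.sum_cons]
    rw [ih, inner_getD]
    by_cases h : q = k
    · simp only [if_pos h]
      ring
    · simp [h]

lemma middle_keys (L : List String) (I : List (String × Int))
    (po : PySem.Dict String Int) (k : String) (w : Int) (hne : L ≠ [])
    (hfil : ∀ s ∈ L, ∃ rv ∈ I, PySem.Str.isIn s rv.1) :
    (L.foldl (fun po s => I.foldl (fun po rv =>
        if PySem.Str.isIn s rv.1 then po.modify k 0 (· + w) else po) po) po).keys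
      = PySem.Set.add po.keys k := by
  induction L generalizing po with
  | nil => exact absurd rfl hne
  | cons s t ih =>
    simp only [List.foldl_cons]
    have hany : I.any (fun rv => PySem.Str.isIn s rv.1) = true := by
      rw [List.any_eq_true]
      rcases hfil s (by simp) with ⟨rv, hrv, hin⟩
      exact ⟨rv, hrv, hin⟩
    rcases eq_or_ne t [] with rfl | ht
    · simp only [List.foldl_nil]
      rw [inner_keys, if_pos hany]
    · rw [ih _ ht (fun u hu => hfil u (List.mem_cons_of_mem _ hu)),
          inner_keys, if_pos hany, set_add_idem]

lemma outer_getD (d : PySem.Dict String Int) (l : List String) (hn : l.Nodup)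
    (po : PySem.Dict String Int) (q : String) :
    (l.foldl (fun pont plate =>
      (PySem.Set.ofList (pvSubs plate)).foldl (fun pont substring =>
        d.items.foldl (fun pont rv =>
          if PySem.Str.isIn substring rv.1 then
            pont.modify plate 0 (· + d.getD plate 0)
          else pont) pont) pont) po).getD q 0
      = po.getD q 0 + (if q ∈ l then pvSB d q else 0) := by
  induction l generalizing po with
  | nil => simp
  | cons a t ih =>
    obtain ⟨ha, ht⟩ := List.nodup_cons.1 hn
    simp only [List.foldl_cons]
    rw [ih ht, middle_getD]
    by_cases hq : q = a
    · subst hq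
      have hqt : q ∉ t := ha
      simp only [if_neg hqt, List.mem_cons, true_or]
      unfold pvSB
      ring
    · simp only [if_neg hq, List.mem_cons]
      by_cases hqt : q ∈ t
      · simp [hqt]
      · simp [hqt, hq]

-- substrings produced by pvSubs: length ≥ 2 infixes
lemma mem_pvSubs {p s : String} (h : s ∈ pvSubs p) :
    2 ≤ s.toList.length ∧ s.toList <:+: p.toList := by
  unfold pvSubs at h
  rw [List.mem_flatMap] at h
  obtain ⟨i, hi, h⟩ := h
  rw [List.mem_map] at h
  obtain ⟨j, hj, rfl⟩ := h
  rw [PySem.List.mem_pyRange_one] at hi hj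
  have hlen := PySem.Str.len_eq p
  have hts : (PySem.Str.slice p (some j) (some (j + i))).toList
      = List.take ((j + i).toNat - j.toNat) (List.drop j.toNat p.toList) := by
    unfold PySem.Str.slice PySem.Chars.slice
    rw [String.toList_ofList]
    rw [PySem.List.slice_toNat _ hj.1 (by omega)]
  have hij : (j + i).toNat - j.toNat = i.toNat := by omega
  constructor
  · rw [hts, hij, List.length_take, List.length_drop]
    omega
  · rw [hts]
    exact (List.take_prefix _ _).isInfix.trans (List.drop_suffix _ _).isInfix

lemma pvSubs_ne_nil_iff (p : String) : pvSubs p ≠ [] ↔ 3 ≤ PySem.Str.len p := by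
  have hpr : ∀ a b : Int, PySem.List.pyRange a b = [] ↔ b ≤ a := by
    intro a b
    rw [← List.length_eq_zero_iff, PySem.List.length_pyRange_one]
    omega
  have hlen := PySem.Str.len_eq p
  unfold pvSubs
  constructor
  · intro h
    by_contra h3
    apply h
    have hr : PySem.List.pyRange 2 (PySem.Str.len p) = [] := (hpr _ _).2 (by omega)
    rw [hr, List.flatMap_nil]
  · intro h3 hnil
    rw [List.flatMap_eq_nil_iff] at hnil
    have h2 : (2 : Int) ∈ PySem.List.pyRange 2 (PySem.Str.len p) := by
      rw [PySem.List.mem_pyRange_one]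
      omega
    have := hnil 2 h2
    rw [List.map_eq_nil_iff, hpr] at this
    omega

lemma infix_of_mem_pvSeen {r s : String} (h : s ∈ pvSeen r) : s.toList <:+: r.toList := by
  unfold pvSeen at h
  rw [List.mem_flatMap] at h
  obtain ⟨i, hi, h⟩ := h
  rw [List.mem_map] at h
  obtain ⟨j, hj, rfl⟩ := h
  rw [PySem.List.mem_pyRange_one] at hi hj
  have hts : (PySem.Str.slice r (some i) (some j)).toList
      = List.take (j.toNat - i.toNat) (List.drop i.toNat r.toList) := by
    unfold PySem.Str.slice PySem.Chars.slice
    rw [String.toList_ofList]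
    rw [PySem.List.slice_toNat _ hi.1 (by omega)]
  rw [hts]
  exact (List.take_prefix _ _).isInfix.trans (List.drop_suffix _ _).isInfix

lemma mem_pvSeen_of_infix {r s : String} (h2 : 2 ≤ s.toList.length)
    (hin : s.toList <:+: r.toList) : s ∈ pvSeen r := by
  obtain ⟨u, v, huv⟩ := hin
  have hlen := PySem.Str.len_eq r
  have hn : r.toList.length = u.length + s.toList.length + v.length := by
    rw [← huv]
    simp [List.length_append]
    omega
  unfold pvSeen
  rw [List.mem_flatMap]
  refine ⟨(u.length : Int), ?_, ?_⟩
  · rw [PySem.List.mem_pyRange_one]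
    omega
  · rw [List.mem_map]
    refine ⟨(u.length : Int) + (s.toList.length : Int), ?_, ?_⟩
    · rw [PySem.List.mem_pyRange_one]
      omega
    · rw [← String.toList_inj]
      unfold PySem.Str.slice PySem.Chars.slice
      rw [String.toList_ofList]
      rw [PySem.List.slice_toNat _ (by omega) (by omega)]
      have h1 : ((u.length : Int) + (s.toList.length : Int)).toNat - ((u.length : Int)).toNat
          = s.toList.length := by omega
      have h2 : ((u.length : Int)).toNat = u.length := by omega
      rw [h1, h2, ← huv, List.append_assoc, List.drop_left]
      exact List.take_left

lemma isIn_iff_mem_pvSeen {r s : String} (h2 : 2 ≤ s.toList.length) :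
    PySem.Str.isIn s r = true ↔ s ∈ pvSeen r := by
  rw [PySem.Str.isIn_iff_infix]
  constructor
  · exact mem_pvSeen_of_infix h2
  · exact infix_of_mem_pvSeen

lemma outer_keys (d : PySem.Dict String Int) (l : List String) (hn : l.Nodup)
    (hsub : ∀ x ∈ l, x ∈ d.keys)
    (po : PySem.Dict String Int) (hpo : ∀ x ∈ l, x ∉ po.keys) :
    (l.foldl (fun pont plate =>
      (PySem.Set.ofList (pvSubs plate)).foldl (fun pont substring =>
        d.items.foldl (fun pont rv =>
          if PySem.Str.isIn substring rv.1 then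
            pont.modify plate 0 (· + d.getD plate 0)
          else pont) pont) pont) po).keys
      = po.keys ++ l.filter (fun p => 3 ≤ PySem.Str.len p) := by
  induction l generalizing po with
  | nil => simp
  | cons a t ih =>
    obtain ⟨ha, ht⟩ := List.nodup_cons.1 hn
    simp only [List.foldl_cons, List.filter_cons]
    by_cases h3 : 3 ≤ PySem.Str.len a
    · have hsubs : pvSubs a ≠ [] := (pvSubs_ne_nil_iff a).2 h3
      have hset : PySem.Set.ofList (pvSubs a) ≠ [] := by
        obtain ⟨y, hy⟩ := List.exists_mem_of_ne_nil _ hsubs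
        exact List.ne_nil_of_mem ((PySem.Set.mem_ofList _ _).2 hy)
      have hfil : ∀ s ∈ PySem.Set.ofList (pvSubs a),
          ∃ rv ∈ d.items, PySem.Str.isIn s rv.1 := by
        intro s hs
        rw [PySem.Set.mem_ofList] at hs
        obtain ⟨_, hinf⟩ := mem_pvSubs hs
        have hak : a ∈ d.items.map (fun x => x.1) := hsub a (List.mem_cons_self)
        rw [List.mem_map] at hak
        obtain ⟨rv, hrv, hfst⟩ := hak
        refine ⟨rv, hrv, ?_⟩
        rw [PySem.Str.isIn_iff_infix, hfst]
        exact hinf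
      have hk : ((PySem.Set.ofList (pvSubs a)).foldl (fun pont substring =>
          d.items.foldl (fun pont rv =>
            if PySem.Str.isIn substring rv.1 then
              pont.modify a 0 (· + d.getD a 0)
            else pont) pont) po).keys = po.keys ++ [a] := by
        rw [middle_keys _ _ _ _ _ hset hfil]
        unfold PySem.Set.add
        rw [if_neg (fun hc => hpo a (List.mem_cons_self) ((PySem.Set.contains_iff _ _).1 hc))]
      rw [ih ht (fun x hx => hsub x (List.mem_cons_of_mem _ hx)) _
          (by
            intro x hx
            rw [hk, List.mem_append, List.mem_singleton]
            rintro (h1 | rfl)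
            · exact hpo x (List.mem_cons_of_mem _ hx) h1
            · exact ha hx), hk]
      rw [if_pos (decide_eq_true h3), List.append_assoc]
      rfl
    · have hsubs : pvSubs a = [] := by
        by_contra hne
        exact h3 ((pvSubs_ne_nil_iff a).1 hne)
      have hofl : PySem.Set.ofList (pvSubs a) = ([] : List String) := by
        rw [hsubs]
        rfl
      rw [hofl]
      simp only [List.foldl_nil]
      rw [if_neg (by
        rw [decide_eq_false h3]
        exact Bool.false_ne_true)]
      exact ih ht (fun x hx => hsub x (List.mem_cons_of_mem _ hx)) _
        (fun x hx => hpo x (List.mem_cons_of_mem _ hx))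

lemma contain_getD (l : List String) (co : PySem.Dict String Int) (s : String) :
    (l.foldl (fun con r =>
      (PySem.Set.ofList (pvSeen r)).foldl (fun con t =>
        con.insert t (con.getD t 0 + 1)) con) co).getD s 0
      = co.getD s 0 + (l.countP (fun r => decide (s ∈ PySem.Set.ofList (pvSeen r))) : Int) := by
  induction l generalizing co with
  | nil => simp
  | cons r t ih =>
    simp only [List.foldl_cons, List.countP_cons]
    rw [ih, PySem.Dict.getD_foldl_insert_add_one]
    by_cases hm : s ∈ PySem.Set.ofList (pvSeen r)
    · rw [List.count_eq_one_of_mem (PySem.Set.nodup_ofList _) hm]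
      simp only [hm, decide_true]
      push_cast
      ring
    · rw [List.count_eq_zero.2 hm]
      simp only [hm, decide_false]
      push_cast
      ring

lemma contain_eq_cnt (d : PySem.Dict String Int) {s : String} (h2 : 2 ≤ s.toList.length) :
    (pvContain d).getD s 0 = pvCnt d.items s := by
  unfold pvContain pvCnt
  rw [contain_getD, PySem.Dict.getD_empty, zero_add]
  have hkeys : d.keys = d.items.map (fun x => x.1) := rfl
  rw [hkeys, List.countP_map]
  congr 1
  apply List.countP_congr
  intro rv _
  simp only [Function.comp, decide_eq_true_eq]
  rw [PySem.Set.mem_ofList]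
  exact (isIn_iff_mem_pvSeen h2).symm

lemma insertBy_congr {α : Type} (f g : α → α → Bool) (x : α) (ys : List α)
    (h : ∀ y ∈ ys, f x y = g x y) :
    PySem.List.insertBy f x ys = PySem.List.insertBy g x ys := by
  induction ys with
  | nil => rfl
  | cons y t ih =>
    rw [show PySem.List.insertBy f x (y :: t)
          = if f x y then x :: y :: t else y :: PySem.List.insertBy f x t from rfl,
        show PySem.List.insertBy g x (y :: t)
          = if g x y then x :: y :: t else y :: PySem.List.insertBy g x t from rfl,
        h y (List.mem_cons_self)]
    split_ifs with hg
    · rfl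
    · rw [ih (fun z hz => h z (List.mem_cons_of_mem _ hz))]

lemma sorted_rev_congr (xs : List String) (k k' : String → Int)
    (h : ∀ x ∈ xs, k x = k' x) :
    PySem.List.sorted xs k true = PySem.List.sorted xs k' true := by
  rw [PySem.List.sorted_rev_eq_foldl_insertBy, PySem.List.sorted_rev_eq_foldl_insertBy]
  suffices haux : ∀ (l : List String) (acc : List String),
      (∀ x ∈ l, k x = k' x) → (∀ y ∈ acc, k y = k' y) →
      l.foldl (fun acc x => PySem.List.insertBy (fun a b => decide (k b < k a)) x acc) acc
        = l.foldl (fun acc x => PySem.List.insertBy (fun a b => decide (k' b < k' a)) x acc) acc by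
    exact haux xs [] h (by simp)
  intro l
  induction l with
  | nil => intro acc _ _; rfl
  | cons x t ih =>
    intro acc hl hacc
    simp only [List.foldl_cons]
    have hx := hl x (List.mem_cons_self)
    have hstep : PySem.List.insertBy (fun a b => decide (k b < k a)) x acc
        = PySem.List.insertBy (fun a b => decide (k' b < k' a)) x acc := by
      apply insertBy_congr
      intro y hy
      rw [hx, hacc y hy]
    rw [hstep]
    refine ih _ (fun z hz => hl z (List.mem_cons_of_mem _ hz)) ?_
    intro y hy
    rw [PySem.List.mem_insertBy] at hy
    rcases hy with rfl | hy
    · exact hx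
    · exact hacc y hy

lemma score_eq_sb (d : PySem.Dict String Int) (p : String) :
    pvScore d p = pvSB d p := by
  unfold pvScore pvSB
  rw [mul_comm]
  congr 1
  apply congrArg List.sum
  apply List.map_congr_left
  intro s hs
  rw [PySem.Set.mem_ofList] at hs
  exact contain_eq_cnt d (mem_pvSubs hs).1

lemma pont_keys (d : PySem.Dict String Int) (h : d.keys.Nodup) :
    (pvPont d).keys = d.keys.filter (fun p => 3 ≤ PySem.Str.len p) := by
  unfold pvPont
  rw [outer_keys d d.keys h (fun x hx => hx) PySem.Dict.empty
      (by
        intro x _ hx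
        rw [PySem.Dict.keys_empty] at hx
        exact absurd hx (List.not_mem_nil))]
  rw [PySem.Dict.keys_empty, List.nil_append]

lemma pont_getD (d : PySem.Dict String Int) (h : d.keys.Nodup) (q : String) (hq : q ∈ d.keys) :
    (pvPont d).getD q 0 = pvSB d q := by
  unfold pvPont
  rw [outer_getD d d.keys h PySem.Dict.empty q, PySem.Dict.getD_empty, if_pos hq, zero_add]

-- ===== VERDICT (by name: the statement is the Claim_ definition above) =====
theorem definePossibleReadings_spec : Claim_equal_definePossibleReadings := by
  intro plates _
  unfold Spec_definePossibleReadings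
  simp only [definePossibleReadings, definePossibleReadings_alt]
  apply congrArg (fun xs => PySem.List.slice xs none (some 2))
  have hnd := PySem.Dict.nodup_keys_ofList plates
  rw [pont_keys _ hnd]
  have hsb : pvScore (PySem.Dict.ofList plates) = pvSB (PySem.Dict.ofList plates) :=
    funext (score_eq_sb _)
  rw [hsb]
  apply sorted_rev_congr
  intro p hp
  rw [List.mem_filter] at hp
  exact pont_getD _ hnd p hp.1
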